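-- pv_equiv track=rewrite | github.com/Arnie016/erdos170 | src/sparse_ruler/frontier_atlas.py | _terminal_run
-- ===== SOURCE A (Python) =====
-- from typing import Dict, Iterable, List, Optional, Sequence, Tuple
--
-- def _terminal_run(marks: Sequence[int], n: int) -> List[int]:
--     interior = [mark for mark in marks if mark < n]
--     if not interior:
--         return []
--     run = [interior[-1]]
--     for mark in reversed(interior[:-1]):
--         if mark == run[-1] - 1:
--             run.append(mark)
--         else:
--             break
--     return list(reversed(run))
-- ===== SOURCE B (Python) =====
-- def _terminal_run(marks, n):
--     run = []
--     for mark in marks: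
--         if mark >= n:
--             continue
--         if run and mark == run[-1] + 1:
--             run.append(mark)
--         else:
--             run = [mark]
--     return run
-- ===== Notes on version B (the rewrite author's own statement) =====
-- stated objective: simpler
-- what changed: Single forward pass with a reset-on-break accumulator (run restarts at every non-consecutive mark) instead of filtering, scanning backwards from the end and reversing the collected run.
import Mathlib
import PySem

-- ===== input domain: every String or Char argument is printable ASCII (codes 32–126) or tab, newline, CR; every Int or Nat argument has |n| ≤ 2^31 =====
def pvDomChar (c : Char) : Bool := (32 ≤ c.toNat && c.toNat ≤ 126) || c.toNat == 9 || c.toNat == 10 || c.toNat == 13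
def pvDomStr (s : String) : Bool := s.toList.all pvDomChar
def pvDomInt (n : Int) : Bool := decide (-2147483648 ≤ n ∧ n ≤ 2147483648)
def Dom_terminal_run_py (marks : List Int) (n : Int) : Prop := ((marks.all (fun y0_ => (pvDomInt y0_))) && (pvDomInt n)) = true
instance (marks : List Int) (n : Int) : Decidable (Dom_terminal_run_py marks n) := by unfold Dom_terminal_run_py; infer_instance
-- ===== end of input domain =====

-- B rewrites A's backward scan-and-reverse as one forward pass with a reset-on-break accumulator (objective: simpler).

-- ===== PORT A =====
-- the 'for mark in reversed(interior[:-1])' loop with its break; run[-1] is run.getLast!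
def pvALoop (rev : List Int) (run : List Int) : List Int :=
  match rev with
  | [] => run
  | m :: rest => if m = run.getLast! - 1 then pvALoop rest (run ++ [m]) else run

def terminal_run_py (marks : List Int) (n : Int) : List Int :=
  let interior := marks.filter (fun mark => mark < n)
  if interior.isEmpty then []
  else
    -- interior[-1] on a nonempty list is interior.getLast!; interior[:-1] is dropLast; reversed(...) is .reverse
    (pvALoop interior.dropLast.reverse [interior.getLast!]).reverse

-- ===== PORT B =====
def terminal_run_py_alt (marks : List Int) (n : Int) : List Int :=
  marks.foldl
    (fun run mark =>
      if mark ≥ n then run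
      else if run ≠ [] ∧ mark = run.getLast! + 1 then run ++ [mark]
      else [mark])
    []

-- ===== PRECONDITION & SPEC =====
def Spec_terminal_run_py (marks : List Int) (n : Int) (out : List Int) : Prop := out = terminal_run_py_alt marks n
instance (marks : List Int) (n : Int) (out : List Int) : Decidable (Spec_terminal_run_py marks n out) := by unfold Spec_terminal_run_py; infer_instance

-- ===== CLAIM (what is proved, stated in full; the proofs are below) =====
def Claim_equal_terminal_run_py : Prop := ∀ (marks : List Int) (n : Int), Dom_terminal_run_py marks n → Spec_terminal_run_py marks n (terminal_run_py marks n)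

-- ===== LEMMAS AND PROOFS =====

-- the consecutive descending run taken from a reversed prefix
def pvTw (v : Int) : List Int → List Int
  | [] => []
  | m :: r => if m = v - 1 then m :: pvTw m r else []

-- B's loop body (with the filter test fused in A's order)
def pvStep (run : List Int) (mark : Int) : List Int :=
  if run ≠ [] ∧ mark = run.getLast! + 1 then run ++ [mark] else [mark]

-- A's value on the filtered list, in closed form
def pvAcore (l : List Int) : List Int :=
  if l = [] then [] else (pvTw l.getLast! l.dropLast.reverse).reverse ++ [l.getLast!]

theorem pvGetLast!_concat (l : List Int) (a : Int) : (l ++ [a]).getLast! = a := by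
  simp only [List.getLast!_eq_getLast?_getD, List.getLast?_append, List.getLast?_singleton,
    Option.some_or, Int.default_eq_zero, Option.getD_some]

theorem pvALoop_tw (rev : List Int) : ∀ (run : List Int) (v : Int), run ≠ [] → run.getLast! = v →
    pvALoop rev run = run ++ pvTw v rev := by
  induction rev with
  | nil => intro run v _ _; simp [pvALoop, pvTw]
  | cons m rest ih =>
    intro run v hne hv
    show (if m = run.getLast! - 1 then pvALoop rest (run ++ [m]) else run)
        = run ++ (if m = v - 1 then m :: pvTw m rest else [])
    rw [hv]
    by_cases h : m = v - 1
    · rw [if_pos h, if_pos h, ih (run ++ [m]) m (by simp) (pvGetLast!_concat run m)]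
      simp
    · rw [if_neg h, if_neg h]; simp

theorem pvAcore_nonempty_getLast! (l : List Int) (h : l ≠ []) :
    pvAcore l ≠ [] ∧ (pvAcore l).getLast! = l.getLast! := by
  refine ⟨by simp [pvAcore, h], ?_⟩
  simp only [pvAcore, if_neg h, pvGetLast!_concat]

theorem pvAcore_snoc (l : List Int) (x : Int) : pvAcore (l ++ [x]) = pvStep (pvAcore l) x := by
  have hLHS : pvAcore (l ++ [x]) = (pvTw x l.reverse).reverse ++ [x] := by
    simp [pvAcore]
  cases l using List.reverseRecOn with
  | nil => simp [pvTw, pvAcore, pvStep]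
  | append_singleton l'' y _ =>
    have hA : pvAcore (l'' ++ [y]) = (pvTw y l''.reverse).reverse ++ [y] := by
      simp [pvAcore]
    obtain ⟨hne, hlast⟩ := pvAcore_nonempty_getLast! (l'' ++ [y]) (by simp)
    rw [hLHS]
    by_cases h : y = x - 1
    · have : pvTw x (l'' ++ [y]).reverse = y :: pvTw y l''.reverse := by
        simp [pvTw, h]
      rw [this]
      have hcond : pvAcore (l'' ++ [y]) ≠ [] ∧ x = (pvAcore (l'' ++ [y])).getLast! + 1 := by
        refine ⟨hne, ?_⟩
        rw [hlast, pvGetLast!_concat]; omega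
      unfold pvStep
      rw [if_pos hcond, hA]
      simp
    · have : pvTw x (l'' ++ [y]).reverse = [] := by
        simp [pvTw, h]
      rw [this]
      have hcond : ¬ (pvAcore (l'' ++ [y]) ≠ [] ∧ x = (pvAcore (l'' ++ [y])).getLast! + 1) := by
        rw [hlast, pvGetLast!_concat]
        intro ⟨_, hx⟩; omega
      unfold pvStep
      rw [if_neg hcond]
      simp

theorem pvFold_eq_Acore (l : List Int) : l.foldl pvStep [] = pvAcore l := by
  induction l using List.reverseRecOn with
  | nil => simp [pvAcore]
  | append_singleton l x ih => rw [List.foldl_append, ih, pvAcore_snoc]; rfl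

theorem pvA_eq_Acore (marks : List Int) (n : Int) :
    terminal_run_py marks n = pvAcore (marks.filter (fun mark => mark < n)) := by
  simp only [terminal_run_py, pvAcore]
  set l := marks.filter (fun mark => decide (mark < n)) with hl
  by_cases h : l = []
  · simp [h]
  · simp only [List.isEmpty_iff, h, if_false]
    rw [pvALoop_tw l.dropLast.reverse [l.getLast!] l.getLast! (by simp) (by simp)]
    simp

theorem pvB_eq_fold (marks : List Int) (n : Int) :
    terminal_run_py_alt marks n = (marks.filter (fun mark => decide (mark < n))).foldl pvStep [] := by
  rw [List.foldl_filter]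
  unfold terminal_run_py_alt
  congr 1
  funext run mark
  by_cases h : mark < n
  · rw [if_neg (by omega : ¬ mark ≥ n),
      if_pos (show (decide (mark < n)) = true by simpa using h)]
    rfl
  · rw [if_pos (by omega : mark ≥ n),
      if_neg (show ¬ (decide (mark < n)) = true by simpa using h)]

-- ===== VERDICT (by name: the statement is the Claim_ definition above) =====
theorem terminal_run_py_spec : Claim_equal_terminal_run_py := by
  intro marks n _
  unfold Spec_terminal_run_py
  rw [pvA_eq_Acore, pvB_eq_fold, pvFold_eq_Acore]
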